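-- pv_equiv track=rewrite | github.com/bdeluca/kobobo | src/utils/sorting.py | get_sort_key
-- ===== SOURCE A (Python) =====
-- ARTICLES = ('the', 'a', 'an')
--
-- def get_sort_key(title):
--     """
--     Returns a sort key for a title, removing leading articles.
--
--     Examples:
--         "The Martian" -> "martian"
--         "A Game of Thrones" -> "game of thrones"
--         "An Unexpected Journey" -> "unexpected journey"
--         "Foundation" -> "foundation"
--     """
--     if not title:
--         return ""
--
--     # Convert to lowercase for comparison
--     title_lower = title.lower().strip()
--
--     # Check if title starts with any article
--     for article in ARTICLES:
--         if title_lower.startswith(article + ' '):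
--             # Remove the article and the space after it
--             return title_lower[len(article) + 1:].strip()
--
--     return title_lower
-- ===== SOURCE B (Python) =====
-- # DFA over the characters: states spell out the article prefixes, accept on a space.
-- _TRANS = {(0, 'a'): 1, (0, 't'): 2, (1, 'n'): 3, (2, 'h'): 4, (4, 'e'): 5}
-- _ACCEPT = {1, 3, 5}  # read exactly 'a', 'an', 'the'
--
--
-- def get_sort_key(title):
--     """Sort key via a tiny finite automaton that consumes the leading article."""
--     if not title:
--         return ""
--     t = title.lower().strip()
--     state = 0
--     i = 0
--     for c in t:
--         if c == ' ':
--             if state in _ACCEPT: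
--                 return t[i + 1:].strip()
--             return t
--         nxt = _TRANS.get((state, c))
--         if nxt is None:
--             return t
--         state = nxt
--         i += 1
--     return t
-- ===== Notes on version B (the rewrite author's own statement) =====
-- stated objective: alternative
-- what changed: Replaces the per-article startswith loop with a single character-by-character pass driven by an explicit finite automaton whose states spell out the article prefixes, accepting at the first space.
import Mathlib
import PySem

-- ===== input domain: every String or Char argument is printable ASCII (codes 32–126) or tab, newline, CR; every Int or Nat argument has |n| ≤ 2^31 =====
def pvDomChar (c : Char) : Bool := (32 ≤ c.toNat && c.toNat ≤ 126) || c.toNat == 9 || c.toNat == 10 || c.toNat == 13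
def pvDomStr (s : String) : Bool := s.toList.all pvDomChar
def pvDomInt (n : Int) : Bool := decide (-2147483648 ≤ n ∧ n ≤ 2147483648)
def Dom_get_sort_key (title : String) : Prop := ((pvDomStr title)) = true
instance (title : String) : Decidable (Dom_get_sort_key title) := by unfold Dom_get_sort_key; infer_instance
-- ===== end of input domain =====

-- B replaces A's per-article startswith loop by a single character-by-character pass driven by
-- an explicit finite automaton whose states spell out the article prefixes; return value only.

-- ===== PORT A =====
-- ARTICLES = ('the', 'a', 'an')  (shared module constant)
def pvArticles : List (List Char) := [['t','h','e'], ['a'], ['a','n']]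

-- the 'for article in ARTICLES' loop
def gskLoop (t : List Char) : List (List Char) → List Char
  | [] => t
  | a :: rest =>
    if PySem.Chars.startswith t (a ++ [' ']) then
      PySem.Chars.strip (PySem.Chars.slice t (some ((a.length : Int) + 1)) none)
    else gskLoop t rest

def get_sort_key (title : String) : String :=
  if title = "" then ""
  else
    String.ofList (gskLoop (PySem.Chars.strip (PySem.Chars.lower title.toList)) pvArticles)

-- ===== PORT B =====
-- _TRANS = {(0,'a'):1, (0,'t'):2, (1,'n'):3, (2,'h'):4, (4,'e'):5}
def pvTrans : List ((Int × Char) × Int) :=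
  [((0,'a'),1), ((0,'t'),2), ((1,'n'),3), ((2,'h'),4), ((4,'e'),5)]
-- _ACCEPT = {1, 3, 5}
def pvAccept : List Int := [1, 3, 5]

-- hand port of _TRANS.get (first matching key, else none); exact: the dict's keys are distinct
def pvGet (k : Int × Char) : List ((Int × Char) × Int) → Option Int
  | [] => none
  | (k', v) :: rest => if k = k' then some v else pvGet k rest

-- the 'for c in t' loop, with state and index as accumulators
def gskDfa (t : List Char) : Int → Int → List Char → List Char
  | _, _, [] => t
  | state, i, c :: rest =>
    if c = ' ' then
      if state ∈ pvAccept then PySem.Chars.strip (PySem.Chars.slice t (some (i + 1)) none)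
      else t
    else
      match pvGet (state, c) pvTrans with
      | some s' => gskDfa t s' (i + 1) rest
      | none => t

def get_sort_key_alt (title : String) : String :=
  if title = "" then ""
  else
    let t := PySem.Chars.strip (PySem.Chars.lower title.toList)
    String.ofList (gskDfa t 0 0 t)

-- ===== PRECONDITION & SPEC =====
def Spec_get_sort_key (title : String) (out : String) : Prop := out = get_sort_key_alt title
instance (title : String) (out : String) : Decidable (Spec_get_sort_key title out) := by unfold Spec_get_sort_key; infer_instance

-- ===== CLAIM (what is proved, stated in full; the proofs are below) =====
def Claim_equal_get_sort_key : Prop := ∀ (title : String), Dom_get_sort_key title → Spec_get_sort_key title (get_sort_key title)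

-- ===== LEMMAS AND PROOFS =====

-- the DFA reads at most four characters before deciding, so the whole equivalence
-- reduces by cases on the first four characters of the cleaned title
lemma dfa_eq_loop (t : List Char) : gskDfa t 0 0 t = gskLoop t pvArticles := by
  cases t with
  | nil => decide
  | cons c0 r0 =>
    by_cases h0a : c0 = 'a'
    · subst h0a
      cases r0 with
      | nil => decide
      | cons c1 r1 =>
        by_cases h1s : c1 = ' '
        · subst h1s
          simp [gskDfa, gskLoop, pvArticles, pvTrans, pvAccept, pvGet,
            PySem.Chars.startswith, List.isPrefixOf]
        · by_cases h1n : c1 = 'n'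
          · subst h1n
            cases r1 with
            | nil => decide
            | cons c2 r2 =>
              by_cases h2s : c2 = ' '
              · subst h2s
                simp [gskDfa, gskLoop, pvArticles, pvTrans, pvAccept, pvGet,
                  PySem.Chars.startswith, List.isPrefixOf]
              · simp [gskDfa, gskLoop, pvArticles, pvTrans, pvAccept, pvGet,
                  Prod.mk.injEq, PySem.Chars.startswith, List.isPrefixOf, h2s, Ne.symm h2s]
          · simp [gskDfa, gskLoop, pvArticles, pvTrans, pvAccept, pvGet,
              Prod.mk.injEq, PySem.Chars.startswith, List.isPrefixOf, h1s, h1n,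
              Ne.symm h1s, Ne.symm h1n]
    · by_cases h0t : c0 = 't'
      · subst h0t
        cases r0 with
        | nil => decide
        | cons c1 r1 =>
          by_cases h1h : c1 = 'h'
          · subst h1h
            cases r1 with
            | nil => decide
            | cons c2 r2 =>
              by_cases h2e : c2 = 'e'
              · subst h2e
                cases r2 with
                | nil => decide
                | cons c3 r3 =>
                  by_cases h3s : c3 = ' '
                  · subst h3s
                    simp [gskDfa, gskLoop, pvArticles, pvTrans, pvAccept, pvGet,
                      PySem.Chars.startswith, List.isPrefixOf]
                  · simp [gskDfa, gskLoop, pvArticles, pvTrans, pvAccept, pvGet,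
                      Prod.mk.injEq, PySem.Chars.startswith, List.isPrefixOf, h3s, Ne.symm h3s]
              · simp [gskDfa, gskLoop, pvArticles, pvTrans, pvAccept, pvGet,
                  Prod.mk.injEq, PySem.Chars.startswith, List.isPrefixOf, h2e, Ne.symm h2e]
          · simp [gskDfa, gskLoop, pvArticles, pvTrans, pvAccept, pvGet,
              Prod.mk.injEq, PySem.Chars.startswith, List.isPrefixOf, h1h, Ne.symm h1h]
      · simp [gskDfa, gskLoop, pvArticles, pvTrans, pvAccept, pvGet,
          Prod.mk.injEq, PySem.Chars.startswith, List.isPrefixOf, h0a, h0t,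
          Ne.symm h0a, Ne.symm h0t]

-- ===== VERDICT (by name: the statement is the Claim_ definition above) =====
theorem get_sort_key_spec : Claim_equal_get_sort_key := by
  intro title _
  unfold Spec_get_sort_key get_sort_key get_sort_key_alt
  by_cases h : title = ""
  · simp [h]
  · simp only [h, if_false]
    rw [dfa_eq_loop]
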